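-- pv_equiv track=rewrite | github.com/nehasm/Data-Structure-and-Algorithms-using-Python | Advanced/Mr.XandHisShots.py | solve
-- ===== SOURCE A (Python) =====
-- from bisect import bisect_left, bisect_right
--
-- def solve(shots, players):
--     s_array, e_array = [], []
--     for s in shots:
--         i, j = s
--         s_array.append(i)
--         e_array.append(j)
--     s_array.sort()
--     e_array.sort()
--     result = 0
--     for p in players:
--         i, j = p
--         result += bisect_right(s_array, j) - bisect_left(e_array, i)
--     return result
-- ===== SOURCE B (Python) =====
-- def solve(shots, players):
--     result = 0
--     for i, j in players:
--         for s, e in shots: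
--             result += (s <= j) - (e < i)
--     return result
-- ===== Notes on version B (the rewrite author's own statement) =====
-- stated objective: simpler
-- what changed: Replaced the sort-both-endpoint-arrays-then-binary-search approach with a direct nested scan that adds (s <= j) - (e < i) per (player, shot) pair, computing the same per-player count without sorting or bisect.
import Mathlib
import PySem

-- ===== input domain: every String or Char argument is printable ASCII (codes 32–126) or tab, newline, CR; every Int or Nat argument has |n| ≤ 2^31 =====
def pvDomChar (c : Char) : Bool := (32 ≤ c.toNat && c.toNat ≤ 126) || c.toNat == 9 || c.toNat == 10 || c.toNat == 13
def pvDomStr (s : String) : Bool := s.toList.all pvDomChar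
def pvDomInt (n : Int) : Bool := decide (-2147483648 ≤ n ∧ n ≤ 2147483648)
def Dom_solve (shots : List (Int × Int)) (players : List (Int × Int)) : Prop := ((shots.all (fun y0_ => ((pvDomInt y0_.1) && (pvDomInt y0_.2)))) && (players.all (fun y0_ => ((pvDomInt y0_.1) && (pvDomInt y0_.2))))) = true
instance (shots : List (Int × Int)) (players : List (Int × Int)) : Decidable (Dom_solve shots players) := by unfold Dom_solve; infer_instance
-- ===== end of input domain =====

-- B replaces A's sort-plus-binary-search counting by a plain nested scan adding
-- (s <= j) - (e < i) per (player, shot) pair: simpler, no sorting, same exact value.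

-- ===== PORT A =====
def solve (shots : List (Int × Int)) (players : List (Int × Int)) : Int :=
  -- loop building s_array / e_array by appending each endpoint
  let arrays := shots.foldl (fun (acc : List Int × List Int) s => (acc.1 ++ [s.1], acc.2 ++ [s.2])) ([], [])
  -- s_array.sort(); e_array.sort()
  let s_array := PySem.List.sorted arrays.1 (fun x => x)
  let e_array := PySem.List.sorted arrays.2 (fun x => x)
  -- result loop over players with bisect_right / bisect_left
  players.foldl (fun result p =>
    result + ((PySem.List.bisectRight s_array p.2 : Int) - (PySem.List.bisectLeft e_array p.1 : Int))) 0

-- ===== PORT B =====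
def solve_alt (shots : List (Int × Int)) (players : List (Int × Int)) : Int :=
  players.foldl (fun result p =>
    shots.foldl (fun r s =>
      r + ((if s.1 ≤ p.2 then (1 : Int) else 0) - (if s.2 < p.1 then (1 : Int) else 0))) result) 0

-- ===== PRECONDITION & SPEC =====
def Spec_solve (shots : List (Int × Int)) (players : List (Int × Int)) (out : Int) : Prop := out = solve_alt shots players
instance (shots : List (Int × Int)) (players : List (Int × Int)) (out : Int) : Decidable (Spec_solve shots players out) := by unfold Spec_solve; infer_instance

-- ===== CLAIM (what is proved, stated in full; the proofs are below) =====
def Claim_equal_solve : Prop := ∀ (shots : List (Int × Int)) (players : List (Int × Int)), Dom_solve shots players → Spec_solve shots players (solve shots players)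

-- ===== LEMMAS AND PROOFS =====

-- A's endpoint-collecting loop produces the two projection maps.
theorem pv_arrays_eq (shots : List (Int × Int)) (as es : List Int) :
    shots.foldl (fun (acc : List Int × List Int) s => (acc.1 ++ [s.1], acc.2 ++ [s.2])) (as, es)
      = (as ++ shots.map Prod.fst, es ++ shots.map Prod.snd) := by
  induction shots generalizing as es with
  | nil => simp
  | cons h t ih => simp [List.foldl_cons, ih]

-- A list whose predicate holds exactly on the first b positions has countP = b.
theorem pv_countP_eq_of_index (p : Int → Bool) (xs : List Int) (b : Nat)
    (hb : b ≤ xs.length)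
    (hc : ∀ (j : Nat) (hj : j < xs.length), p xs[j] = true ↔ j < b) :
    xs.countP p = b := by
  induction xs generalizing b with
  | nil => simp [Nat.le_zero.mp hb]
  | cons h t ih =>
    cases b with
    | zero =>
      have ht : t.countP p = 0 := by
        apply ih 0 (by omega)
        intro j hj
        have := hc (j + 1) (by simpa using Nat.succ_lt_succ hj)
        simpa using this
      have hh : p h = false := by
        have := hc 0 (by simp)
        simpa using this
      simp [hh, ht]
    | succ k =>
      have hh : p h = true := by
        have := hc 0 (by simp)
        simpa using this
      have ht : t.countP p = k := by
        apply ih k (by simpa using hb)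
        intro j hj
        have := hc (j + 1) (by simpa using Nat.succ_lt_succ hj)
        simpa using this
      simp [hh, ht]

theorem pv_bisectRight_eq_countP (xs : List Int) (x : Int)
    (hs : List.Pairwise (fun a b => a ≤ b) xs) :
    PySem.List.bisectRight xs x = xs.countP (fun v => decide (v ≤ x)) := by
  obtain ⟨h1, h2, h3⟩ := PySem.List.bisectRight_spec xs x hs
  refine (pv_countP_eq_of_index _ xs _ h1 ?_).symm
  intro j hj
  constructor
  · intro hp
    by_contra hlt
    have := h3 j hj (by omega)
    simp at hp
    omega
  · intro hlt
    simpa using h2 j hj hlt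

theorem pv_bisectLeft_eq_countP (xs : List Int) (x : Int)
    (hs : List.Pairwise (fun a b => a ≤ b) xs) :
    PySem.List.bisectLeft xs x = xs.countP (fun v => decide (v < x)) := by
  obtain ⟨h1, h2, h3⟩ := PySem.List.bisectLeft_spec xs x hs
  refine (pv_countP_eq_of_index _ xs _ h1 ?_).symm
  intro j hj
  constructor
  · intro hp
    by_contra hlt
    have := h3 j hj (by omega)
    simp at hp
    omega
  · intro hlt
    simpa using h2 j hj hlt

-- B's inner scan over the shots adds the two counts.
theorem pv_inner_fold (shots : List (Int × Int)) (i j r : Int) :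
    shots.foldl (fun r s =>
      r + ((if s.1 ≤ j then (1 : Int) else 0) - (if s.2 < i then (1 : Int) else 0))) r
      = r + ((shots.countP (fun s => decide (s.1 ≤ j)) : Int)
           - (shots.countP (fun s => decide (s.2 < i)) : Int)) := by
  induction shots generalizing r with
  | nil => simp
  | cons h t ih =>
    rw [List.foldl_cons, ih]
    simp only [List.countP_cons]
    by_cases h1 : h.1 ≤ j <;> by_cases h2 : h.2 < i <;>
      simp only [h1, h2, decide_true, decide_false, if_true, if_false] <;> push_cast <;> ring

-- Per player, A's bisect difference equals B's direct count difference.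
theorem pv_per_player (shots : List (Int × Int)) (i j : Int) :
    ((PySem.List.bisectRight (PySem.List.sorted (shots.map Prod.fst) (fun x => x)) j : Int)
      - (PySem.List.bisectLeft (PySem.List.sorted (shots.map Prod.snd) (fun x => x)) i : Int))
      = ((shots.countP (fun s => decide (s.1 ≤ j)) : Int)
        - (shots.countP (fun s => decide (s.2 < i)) : Int)) := by
  rw [pv_bisectRight_eq_countP _ _ (PySem.List.sorted_pairwise _ _),
      pv_bisectLeft_eq_countP _ _ (PySem.List.sorted_pairwise _ _),
      (PySem.List.sorted_perm (shots.map Prod.fst) (fun x => x) false).countP_eq,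
      (PySem.List.sorted_perm (shots.map Prod.snd) (fun x => x) false).countP_eq,
      List.countP_map, List.countP_map]
  rfl

theorem pv_outer (shots : List (Int × Int)) (players : List (Int × Int)) (acc : Int) :
    players.foldl (fun result p =>
      result + ((PySem.List.bisectRight (PySem.List.sorted (shots.map Prod.fst) (fun x => x)) p.2 : Int)
              - (PySem.List.bisectLeft (PySem.List.sorted (shots.map Prod.snd) (fun x => x)) p.1 : Int))) acc
    = players.foldl (fun result p =>
        shots.foldl (fun r s =>
          r + ((if s.1 ≤ p.2 then (1 : Int) else 0) - (if s.2 < p.1 then (1 : Int) else 0))) result) acc := by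
  simp only [pv_inner_fold, pv_per_player]

-- ===== VERDICT (by name: the statement is the Claim_ definition above) =====
theorem solve_spec : Claim_equal_solve := by
  intro shots players _
  unfold Spec_solve solve solve_alt
  simp only [pv_arrays_eq, List.nil_append]
  exact pv_outer shots players 0
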